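-- pv_equiv track=rewrite | github.com/IUL1AN27/28.09.2022 | pentru acasa.py | divizorii_comuni_3nr
-- ===== SOURCE A (Python) =====
-- def divizorii_comuni_3nr(a,b,c):
--     at=[]
--     bt=[]
--     ct=[]
--     for i in range (1,a+1):
--         if (a%i==0):
--             at.append(i)
--     for j in range (1,b+1):
--         if (b%j==0):
--             bt.append(j)
--     for k in range (1,c+1):
--         if (c%k==0):
--             ct.append(k)
--     d=set(at).intersection(bt)
--     e=set(d).intersection(ct)
--     br=list(e)
--     return (br)
-- ===== SOURCE B (Python) =====
-- def _gcd(x, y):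
--     while y:
--         x, y = y, x % y
--     return x
--
--
-- def divizorii_comuni_3nr(a, b, c):
--     # Common divisors of a, b, c = divisors of gcd(a, b, c), found by
--     # trial division up to sqrt(g); small divisors ascending, cofactors
--     # appended and reversed, so the result is ascending.
--     if a <= 0 or b <= 0 or c <= 0:
--         return []
--     g = _gcd(_gcd(a, b), c)
--     small = []
--     large = []
--     i = 1
--     while i * i <= g:
--         if g % i == 0:
--             small.append(i)
--             if i * i != g:
--                 large.append(g // i)
--         i += 1
--     large.reverse()
--     return small + large
-- ===== Notes on version B (the rewrite author's own statement) =====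
-- stated objective: faster
-- what changed: Instead of three full scans 1..a, 1..b, 1..c building divisor lists and intersecting sets, B computes g = gcd(a,b,c) by Euclid and enumerates divisors of g by trial division up to sqrt(g), merging small divisors with reversed cofactors into one ascending list.
-- outside the precondition, e.g. on divizorii_comuni_3nr(20, 20, 20): A returns [1, 2, 4, 5, 10, 20], B returns [1, 2, 4, 5, 10, 20]; on divizorii_comuni_3nr(40, 40, 40): A returns [1, 2, 4, 5, 8, 40, 10, 20], B returns [1, 2, 4, 5, 8, 10, 20, 40]
import Mathlib
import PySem

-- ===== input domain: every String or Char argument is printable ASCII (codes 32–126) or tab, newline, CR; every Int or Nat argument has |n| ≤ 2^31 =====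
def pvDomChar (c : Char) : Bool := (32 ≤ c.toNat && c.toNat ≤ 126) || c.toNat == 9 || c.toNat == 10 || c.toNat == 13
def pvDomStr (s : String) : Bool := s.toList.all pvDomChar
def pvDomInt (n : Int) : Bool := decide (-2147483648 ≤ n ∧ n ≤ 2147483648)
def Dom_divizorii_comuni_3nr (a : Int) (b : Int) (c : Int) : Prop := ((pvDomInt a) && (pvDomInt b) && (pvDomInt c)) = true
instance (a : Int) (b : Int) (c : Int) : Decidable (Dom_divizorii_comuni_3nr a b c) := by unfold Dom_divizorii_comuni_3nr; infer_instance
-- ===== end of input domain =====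

-- B replaces A's three full scans to a, b, c and set intersections by Euclid's gcd plus
-- trial division up to sqrt(gcd) (objective: faster).

-- ===== PORT A =====
-- Literal port of A. `list(e)` is ported as the Set's element list: on every input admitted by
-- Pre_ (some argument ≤ 0, or gcd ≤ 7) the common divisors are at most four values below 8, so
-- CPython's hash iteration order is exactly this ascending insertion order; Pre_ excludes the
-- inputs on which list(set(...)) order is a hash-table accident.
def divizorii_comuni_3nr (a : Int) (b : Int) (c : Int) : List Int :=
  let at_ : List Int := (PySem.List.pyRange 1 (a+1) 1).foldl
    (fun acc i => if PySem.Int.mod a i = 0 then acc ++ [i] else acc) []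
  let bt : List Int := (PySem.List.pyRange 1 (b+1) 1).foldl
    (fun acc j => if PySem.Int.mod b j = 0 then acc ++ [j] else acc) []
  let ct : List Int := (PySem.List.pyRange 1 (c+1) 1).foldl
    (fun acc k => if PySem.Int.mod c k = 0 then acc ++ [k] else acc) []
  let d : PySem.Set Int := PySem.Set.inter (PySem.Set.ofList at_) bt
  let e : PySem.Set Int := PySem.Set.inter (PySem.Set.ofList d) ct
  let br : List Int := e
  br

-- ===== PORT B =====
-- Euclid's algorithm: while y: x, y = y, x % y   (fuel = |y|+1 makes the recursion structural;
-- pvGcdB_fuel below shows the fuel is never exhausted)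
def pvGcdB_aux : Nat → Int → Int → Int
  | 0, x, _ => x
  | n+1, x, y => if y = 0 then x else pvGcdB_aux n y (PySem.Int.mod x y)

def pvGcdB (x y : Int) : Int := pvGcdB_aux (y.natAbs + 1) x y

-- while i*i <= g: if g%i==0: small.append(i); if i*i != g: large.append(g//i); i+=1
-- (fuel bounds the remaining iterations; it is never exhausted for the initial fuel used below)
def pvDivLoop : Nat → Int → Int → List Int → List Int → List Int
  | 0, _, _, small, large => small ++ large.reverse
  | n+1, g, i, small, large =>
    if i * i ≤ g then
      if PySem.Int.mod g i = 0 then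
        if i * i ≠ g then
          pvDivLoop n g (i+1) (small ++ [i]) (large ++ [PySem.Int.floordiv g i])
        else
          pvDivLoop n g (i+1) (small ++ [i]) large
      else
        pvDivLoop n g (i+1) small large
    else
      small ++ large.reverse

def divizorii_comuni_3nr_alt (a : Int) (b : Int) (c : Int) : List Int :=
  if a ≤ 0 ∨ b ≤ 0 ∨ c ≤ 0 then []
  else
    let g := pvGcdB (pvGcdB a b) c
    pvDivLoop g.toNat g 1 [] []

-- ===== PRECONDITION & SPEC =====
-- Pre_ excludes triples of positive integers whose gcd exceeds 7: there A still returns, but the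
-- ORDER of list(e) is an accident of CPython's hash table (e.g. A(40,40,40) is not sorted); with
-- gcd ≤ 7 the set holds at most four elements below 8, so the order is provably ascending.
def Pre_divizorii_comuni_3nr (a : Int) (b : Int) (c : Int) : Prop :=
  a ≤ 0 ∨ b ≤ 0 ∨ c ≤ 0 ∨ Int.gcd (Int.gcd a b) c ≤ 7
instance (a : Int) (b : Int) (c : Int) : Decidable (Pre_divizorii_comuni_3nr a b c) := by
  unfold Pre_divizorii_comuni_3nr; infer_instance

def pvWitness_divizorii_comuni_3nr : Int × Int × Int := (12, 18, 30)

def Spec_divizorii_comuni_3nr (a : Int) (b : Int) (c : Int) (out : List Int) : Prop := out = divizorii_comuni_3nr_alt a b c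
instance (a : Int) (b : Int) (c : Int) (out : List Int) : Decidable (Spec_divizorii_comuni_3nr a b c out) := by unfold Spec_divizorii_comuni_3nr; infer_instance

-- ===== CLAIM (what is proved, stated in full; the proofs are below) =====
def Claim_equal_divizorii_comuni_3nr : Prop := ∀ (a : Int) (b : Int) (c : Int), Dom_divizorii_comuni_3nr a b c → Pre_divizorii_comuni_3nr a b c → Spec_divizorii_comuni_3nr a b c (divizorii_comuni_3nr a b c)

-- ===== LEMMAS AND PROOFS =====

-- Two strictly increasing integer lists with the same members are equal.
theorem pv_sorted_ext : ∀ (l1 l2 : List Int), l1.Pairwise (· < ·) → l2.Pairwise (· < ·) →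
    (∀ x, x ∈ l1 ↔ x ∈ l2) → l1 = l2 := by
  intro l1
  induction l1 with
  | nil =>
    intro l2 _ _ hmem
    cases l2 with
    | nil => rfl
    | cons b t => exact absurd ((hmem b).2 (List.mem_cons_self)) (List.not_mem_nil)
  | cons a t ih =>
    intro l2 h1 h2 hmem
    cases l2 with
    | nil => exact absurd ((hmem a).1 (List.mem_cons_self)) (List.not_mem_nil)
    | cons b t2 =>
      have hab : a = b := by
        rcases List.mem_cons.1 ((hmem a).1 (List.mem_cons_self)) with h | h
        · exact h
        · rcases List.mem_cons.1 ((hmem b).2 (List.mem_cons_self)) with h' | h'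
          · exact h'.symm
          · have hba := (List.pairwise_cons.1 h1).1 b h'
            have hab := (List.pairwise_cons.1 h2).1 a h
            omega
      subst hab
      have htail : ∀ x, x ∈ t ↔ x ∈ t2 := by
        intro x
        constructor
        · intro hx
          have hax := (List.pairwise_cons.1 h1).1 x hx
          rcases List.mem_cons.1 ((hmem x).1 (List.mem_cons_of_mem _ hx)) with h | h
          · omega
          · exact h
        · intro hx
          have hax := (List.pairwise_cons.1 h2).1 x hx
          rcases List.mem_cons.1 ((hmem x).2 (List.mem_cons_of_mem _ hx)) with h | h
          · omega
          · exact h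
      rw [ih t2 (List.pairwise_cons.1 h1).2 (List.pairwise_cons.1 h2).2 htail]

theorem pvGcdB_aux_eq : ∀ (n : Nat) (x y : Int), y.natAbs < n → 0 ≤ x → 0 ≤ y →
    pvGcdB_aux n x y = Int.gcd x y := by
  intro n
  induction n with
  | zero => intro x y hn _ _; omega
  | succ n ih =>
    intro x y hn hx hy
    rw [pvGcdB_aux]
    split
    next h =>
      subst h
      rw [Int.gcd_def]
      simp [Int.natAbs_of_nonneg hx]
    next h =>
      have hypos : 0 < y := lt_of_le_of_ne hy (Ne.symm h)
      rw [PySem.Int.mod_eq_emod_of_pos hypos]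
      have hmlt := Int.emod_lt_of_pos x hypos
      have hmnn := Int.emod_nonneg x (ne_of_gt hypos)
      rw [ih y (x % y) (by omega) hy hmnn]
      have hmm : x % y = x + -(x / y) * y := by
        rw [Int.emod_def]
        ring
      rw [hmm, Int.gcd_add_mul_right_right, Int.gcd_comm]

theorem pvGcdB_eq (x y : Int) (hx : 0 ≤ x) (hy : 0 ≤ y) : pvGcdB x y = Int.gcd x y :=
  pvGcdB_aux_eq (y.natAbs + 1) x y (by omega) hx hy

-- small divisors and matching cofactors still to be produced from counter i upward
def pvLows (g i : Int) : List Int :=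
  (PySem.List.pyRange i (Int.sqrt g + 1) 1).filter (fun k => decide (k ∣ g))
def pvHighs (g i : Int) : List Int :=
  ((PySem.List.pyRange i (Int.sqrt g + 1) 1).filter (fun k => decide (k ∣ g ∧ k * k ≠ g))).map
    (fun k => g / k)

theorem pv_le_sqrt {i g : Int} (hi : 0 ≤ i) (hg : 0 ≤ g) : i * i ≤ g ↔ i ≤ Int.sqrt g := by
  obtain ⟨i', rfl⟩ := Int.eq_ofNat_of_zero_le hi
  obtain ⟨g', rfl⟩ := Int.eq_ofNat_of_zero_le hg
  rw [Int.sqrt_natCast]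
  constructor
  · intro h
    exact_mod_cast Nat.le_sqrt.2 (by exact_mod_cast h)
  · intro h
    exact_mod_cast Nat.le_sqrt.1 (by exact_mod_cast h)

theorem pv_sqrt_le_self {g : Int} (hg : 0 ≤ g) : Int.sqrt g ≤ g := by
  obtain ⟨g', rfl⟩ := Int.eq_ofNat_of_zero_le hg
  rw [Int.sqrt_natCast]
  exact_mod_cast Nat.sqrt_le_self g'

theorem pvDivLoop_eq (g : Int) (hg : 1 ≤ g) : ∀ (n : Nat) (i : Int), (g + 1 - i).toNat ≤ n → 1 ≤ i →
    ∀ small large, pvDivLoop n g i small large = small ++ pvLows g i ++ (large ++ pvHighs g i).reverse := by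
  intro n
  induction n with
  | zero =>
    intro i hn hi small large
    have hgt : ¬ i * i ≤ g := by
      intro hle
      have h2 : i ≤ i * i := le_mul_of_one_le_left (by omega) hi
      have h3 : g + 1 ≤ i := by omega
      linarith
    have hempty : PySem.List.pyRange i (Int.sqrt g + 1) 1 = [] := by
      apply PySem.List.pyRange_one_eq_nil
      have : ¬ i ≤ Int.sqrt g := fun h => hgt ((pv_le_sqrt (by omega) (by omega)).2 h)
      omega
    simp [pvDivLoop, pvLows, pvHighs, hempty]
  | succ n ih =>
    intro i hn hi small large
    rw [pvDivLoop]
    split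
    next hle =>
      -- i * i ≤ g, so i ≤ sqrt g and the ranges start with i
      have hisq : i ≤ Int.sqrt g := (pv_le_sqrt (by omega) (by omega)).1 hle
      have hsle : Int.sqrt g ≤ g := pv_sqrt_le_self (by omega)
      have hcons : PySem.List.pyRange i (Int.sqrt g + 1) 1
          = i :: PySem.List.pyRange (i+1) (Int.sqrt g + 1) 1 :=
        PySem.List.pyRange_one_cons (by omega)
      have hnext : (g + 1 - (i + 1)).toNat ≤ n := by omega
      have hdvd := PySem.Int.mod_eq_zero_iff_dvd g i
      rw [pvLows, pvHighs, hcons]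
      split
      next hmod =>
        have hidvd : i ∣ g := hdvd.1 hmod
        split
        next hne =>
          rw [ih (i+1) hnext (by omega) (small ++ [i])
              (large ++ [PySem.Int.floordiv g i])]
          rw [PySem.Int.floordiv_eq_ediv_of_pos (by omega)]
          simp [pvLows, pvHighs, hidvd, hne, List.reverse_append,
            List.append_assoc]
        next hne =>
          rw [ih (i+1) hnext (by omega) (small ++ [i]) large]
          have heq : i * i = g := by omega
          simp [pvLows, pvHighs, hidvd, heq, List.reverse_append,
            List.append_assoc]
      next hmod =>
        have hidvd : ¬ i ∣ g := fun h => hmod (hdvd.2 h)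
        rw [ih (i+1) hnext (by omega) small large]
        simp [pvLows, pvHighs, hidvd]
    next hle =>
      -- i * i > g, so sqrt g < i and both ranges are empty
      have hempty : PySem.List.pyRange i (Int.sqrt g + 1) 1 = [] := by
        apply PySem.List.pyRange_one_eq_nil
        have : ¬ i ≤ Int.sqrt g := fun h => hle ((pv_le_sqrt (by omega) (by omega)).2 h)
        omega
      simp [pvLows, pvHighs, hempty]

theorem pv_mem_lows {g x : Int} (hg : 1 ≤ g) : x ∈ pvLows g 1 ↔ 1 ≤ x ∧ x * x ≤ g ∧ x ∣ g := by
  unfold pvLows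
  simp only [List.mem_filter, PySem.List.mem_pyRange_one, decide_eq_true_eq]
  constructor
  · rintro ⟨⟨h1, h2⟩, h3⟩
    exact ⟨h1, (pv_le_sqrt (by omega) (by omega)).2 (by omega), h3⟩
  · rintro ⟨h1, h2, h3⟩
    have := (pv_le_sqrt (by omega) (by omega)).1 h2
    exact ⟨⟨h1, by omega⟩, h3⟩

theorem pv_mem_highs {g x : Int} (hg : 1 ≤ g) : x ∈ pvHighs g 1 ↔ 1 ≤ x ∧ g < x * x ∧ x ∣ g := by
  unfold pvHighs
  simp only [List.mem_map, List.mem_filter, PySem.List.mem_pyRange_one, decide_eq_true_eq]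
  constructor
  · rintro ⟨k, ⟨⟨hk1, _⟩, hkd, hkne⟩, rfl⟩
    have hkk : k * k ≤ g := (pv_le_sqrt (by omega) (by omega)).2 (by omega)
    obtain ⟨q, hq⟩ := hkd
    have hq0 : 0 < q := by nlinarith
    have hgk : g / k = q := by rw [hq]; exact Int.mul_ediv_cancel_left q (by omega)
    rw [hgk]
    have hkq : k < q := by
      by_contra hcon
      push Not at hcon
      have hle : k * q ≤ k * k := mul_le_mul_of_nonneg_left hcon (by omega)
      have h2 : g ≤ k * k := hq ▸ hle
      exact hkne (by omega)
    refine ⟨by omega, by nlinarith, ⟨k, by rw [hq]; ring⟩⟩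
  · rintro ⟨hx1, hxx, hxd⟩
    obtain ⟨k, hk⟩ := hxd
    have hk0 : 0 < k := by nlinarith
    have hkx : k < x := by nlinarith
    refine ⟨k, ⟨⟨by omega, ?_⟩, ⟨x, by rw [hk]; ring⟩, ?_⟩, ?_⟩
    · have hkk : k * k ≤ g := by nlinarith
      have := (pv_le_sqrt (by omega) (by omega)).1 hkk
      omega
    · intro hcon
      nlinarith
    · rw [hk, mul_comm]
      exact Int.mul_ediv_cancel_left x (by omega)

theorem pv_div_lt_div {g k1 k2 : Int} (hg : 1 ≤ g) (h1 : 1 ≤ k1) (h2 : 1 ≤ k2)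
    (d1 : k1 ∣ g) (d2 : k2 ∣ g) (hlt : k1 < k2) : g / k2 < g / k1 := by
  have e1 : k1 * (g / k1) = g := Int.mul_ediv_cancel' d1
  have e2 : k2 * (g / k2) = g := Int.mul_ediv_cancel' d2
  have hq2 : 0 < g / k2 := by nlinarith
  by_contra hcon
  push Not at hcon
  nlinarith

theorem pv_alt_pairwise (g : Int) (hg : 1 ≤ g) :
    (pvLows g 1 ++ (pvHighs g 1).reverse).Pairwise (· < ·) := by
  rw [List.pairwise_append]
  refine ⟨?_, ?_, ?_⟩
  · exact (PySem.List.pairwise_lt_pyRange_one 1 (Int.sqrt g + 1)).filter _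
  · rw [List.pairwise_reverse]
    unfold pvHighs
    rw [List.pairwise_map]
    have hpw : ((PySem.List.pyRange 1 (Int.sqrt g + 1) 1).filter
        (fun k => decide (k ∣ g ∧ k * k ≠ g))).Pairwise (· < ·) :=
      (PySem.List.pairwise_lt_pyRange_one 1 (Int.sqrt g + 1)).filter _
    refine List.Pairwise.imp_of_mem ?_ hpw
    intro k1 k2 hm1 hm2 hlt
    have h1 := List.mem_filter.1 hm1
    have h2 := List.mem_filter.1 hm2
    have hd1 := (of_decide_eq_true h1.2).1
    have hd2 := (of_decide_eq_true h2.2).1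
    have hr1 := (PySem.List.mem_pyRange_one.1 h1.1).1
    have hr2 := (PySem.List.mem_pyRange_one.1 h2.1).1
    exact pv_div_lt_div hg hr1 hr2 hd1 hd2 hlt
  · intro x hx y hy
    have hxl := (pv_mem_lows hg).1 hx
    have hyh := (pv_mem_highs hg).1 (List.mem_reverse.1 hy)
    by_contra hcon
    push Not at hcon
    nlinarith [hxl.1, hxl.2.1, hyh.1, hyh.2.1]

theorem pv_mem_alt {g x : Int} (hg : 1 ≤ g) :
    x ∈ pvLows g 1 ++ (pvHighs g 1).reverse ↔ 1 ≤ x ∧ x ∣ g := by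
  constructor
  · intro hx
    rcases List.mem_append.1 hx with h | h
    · have := (pv_mem_lows hg).1 h; exact ⟨this.1, this.2.2⟩
    · have := (pv_mem_highs hg).1 (List.mem_reverse.1 h); exact ⟨this.1, this.2.2⟩
  · intro ⟨h1, h2⟩
    rcases le_or_gt (x * x) g with h | h
    · exact List.mem_append.2 (Or.inl ((pv_mem_lows hg).2 ⟨h1, h, h2⟩))
    · exact List.mem_append.2 (Or.inr (List.mem_reverse.2 ((pv_mem_highs hg).2 ⟨h1, h, h2⟩)))

-- A's port, with foldl-appends turned into filters and the Sets reduced on Nodup lists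
theorem pvA_unfold (a b c : Int) :
    divizorii_comuni_3nr a b c =
      (((PySem.List.pyRange 1 (a+1) 1).filter (fun i => decide (PySem.Int.mod a i = 0))).filter
          (fun x => ((PySem.List.pyRange 1 (b+1) 1).filter
            (fun j => decide (PySem.Int.mod b j = 0))).contains x)).filter
        (fun x => ((PySem.List.pyRange 1 (c+1) 1).filter
          (fun k => decide (PySem.Int.mod c k = 0))).contains x) := by
  have hat : ((PySem.List.pyRange 1 (a+1) 1).filter
      (fun i => decide (PySem.Int.mod a i = 0))).Nodup :=
    (PySem.List.nodup_pyRange_one 1 (a+1)).filter _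
  simp only [divizorii_comuni_3nr, PySem.List.foldl_append_ite_eq_filter, List.nil_append,
    PySem.Set.inter, PySem.Set.contains_eq_listContains,
    PySem.Set.ofList_eq_self_of_nodup _ hat,
    PySem.Set.ofList_eq_self_of_nodup _ (hat.filter _)]

theorem pvA_mem {a b c x : Int} : x ∈ divizorii_comuni_3nr a b c ↔
    (1 ≤ x ∧ x < a + 1 ∧ x ∣ a) ∧ (1 ≤ x ∧ x < b + 1 ∧ x ∣ b) ∧ (1 ≤ x ∧ x < c + 1 ∧ x ∣ c) := by
  rw [pvA_unfold]
  simp only [List.mem_filter, List.contains_iff_mem, PySem.List.mem_pyRange_one,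
    decide_eq_true_eq, PySem.Int.mod_eq_zero_iff_dvd]
  tauto

theorem pvA_pairwise (a b c : Int) : (divizorii_comuni_3nr a b c).Pairwise (· < ·) := by
  rw [pvA_unfold]
  exact ((PySem.List.pairwise_lt_pyRange_one 1 (a+1)).filter _).filter _ |>.filter _

theorem divizorii_comuni_3nr_eq_alt (a b c : Int) :
    divizorii_comuni_3nr a b c = divizorii_comuni_3nr_alt a b c := by
  unfold divizorii_comuni_3nr_alt
  split
  next hneg =>
    rw [List.eq_nil_iff_forall_not_mem]
    intro x hx
    obtain ⟨⟨hx1, hxa, _⟩, ⟨_, hxb, _⟩, ⟨_, hxc, _⟩⟩ := pvA_mem.1 hx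
    rcases hneg with h | h | h <;> omega
  next hpos =>
    push Not at hpos
    obtain ⟨ha, hb, hc⟩ := hpos
    have hg1 : pvGcdB a b = Int.gcd a b := pvGcdB_eq a b (by omega) (by omega)
    have hg2 : pvGcdB (pvGcdB a b) c = ((Int.gcd (Int.gcd a b) c : Nat) : Int) := by
      rw [hg1]
      exact pvGcdB_eq _ c (Int.natCast_nonneg _) (by omega)
    have hGpos : 1 ≤ ((Int.gcd (Int.gcd a b) c : Nat) : Int) := by
      have hne : Int.gcd ((Int.gcd a b : Nat) : Int) c ≠ 0 := by
        intro h
        rw [Int.gcd_eq_zero_iff] at h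
        omega
      omega
    simp only [hg2]
    rw [pvDivLoop_eq _ hGpos _ 1 (by omega) (by omega) [] []]
    simp only [List.nil_append]
    apply pv_sorted_ext _ _ (pvA_pairwise a b c) (pv_alt_pairwise _ hGpos)
    intro x
    rw [pvA_mem, pv_mem_alt hGpos]
    constructor
    · rintro ⟨⟨hx1, _, hxa⟩, ⟨_, _, hxb⟩, ⟨_, _, hxc⟩⟩
      exact ⟨hx1, Int.dvd_coe_gcd (Int.dvd_coe_gcd hxa hxb) hxc⟩
    · rintro ⟨hx1, hxg⟩
      have hab : x ∣ ((Int.gcd a b : Nat) : Int) :=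
        dvd_trans hxg (Int.gcd_dvd_left _ _)
      have hxa : x ∣ a := dvd_trans hab (Int.gcd_dvd_left a b)
      have hxb : x ∣ b := dvd_trans hab (Int.gcd_dvd_right a b)
      have hxc : x ∣ c := dvd_trans hxg (Int.gcd_dvd_right _ _)
      have h1 : x ≤ a := Int.le_of_dvd (by omega) hxa
      have h2 : x ≤ b := Int.le_of_dvd (by omega) hxb
      have h3 : x ≤ c := Int.le_of_dvd (by omega) hxc
      exact ⟨⟨hx1, by omega, hxa⟩, ⟨hx1, by omega, hxb⟩, ⟨hx1, by omega, hxc⟩⟩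

-- ===== VERDICT (by name: the statement is the Claim_ definition above) =====
theorem divizorii_comuni_3nr_spec : Claim_equal_divizorii_comuni_3nr := by
  intro a b c _ _
  unfold Spec_divizorii_comuni_3nr
  exact divizorii_comuni_3nr_eq_alt a b c
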